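-- pv_equiv track=rewrite | github.com/belzebuu/MaCCS-BC | src/common/graph.py | best_paths_bfs_adj_list
-- ===== SOURCE A (Python) =====
-- def best_paths_bfs_adj_list(v, edges, k, node_mut):
--     """
--     :param v:       first of the k nodes
--     :param edges:   dictionary of edges of a approximation induced by the set of k nodes
--     :param k:       max depth of bfs tree
--     :return:        dictionary of shortest paths from v
--     """
--     black = set()
--     old_gray = set()
--     old_gray.add(v)
--     paths = dict()
--     paths[v] = [v]
--     paths_coverage = dict()
--     paths_coverage[v] = len(coverage({v}, node_mut))
--     degree = 0
--     while degree < k: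
--         gray = set()
--         for i in old_gray:
--             if i in edges:
--                 for w in edges[i]:
--                     gray.add(w)
--                     new_path = paths[i] + [w]
--                     if w not in paths:
--                         paths[w] = new_path
--                         paths_coverage[w] = len(coverage(set(new_path), node_mut))
--                     else:
--                         current_coverage = paths_coverage[w]
--                         new_path_coverage = coverage(set(new_path), node_mut)
--                         if len(new_path_coverage) > current_coverage:
--                             paths[w] = new_path
--                             paths_coverage[w] = len(coverage(new_path, node_mut))
--         degree += 1
--         black |= old_gray
--         gray = gray - black
--         old_gray = gray
--     return paths
--
-- def coverage(a_set, node_mut):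
--     cov = set()
--     if a_set:
--         for v in a_set:
--             if v in node_mut:
--                 cov |= node_mut[v]
--     return cov
-- ===== SOURCE B (Python) =====
-- def best_paths_bfs_adj_list(v, edges, k, node_mut):
--     """Level-synchronous relaxation over an explicit event list: each level is
--     flattened into (parent, child) relaxation events processed by one fold over
--     a single per-node record (path, coverage-set); coverage sets are extended
--     incrementally (parent coverage | child's own mutation set) instead of being
--     recomputed over the whole path, and the loop stops on an empty frontier.
--     Return value only; no argument is mutated."""
--     def mut_of(x):
--         return set(node_mut[x]) if x in node_mut else set()
--     info = {v: ([v], mut_of(v))}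
--     visited = set()
--     frontier = {v}
--     remaining = k
--     while remaining > 0 and frontier:
--         events = [(i, w) for i in frontier for w in edges.get(i, [])]
--         for i, w in events:
--             path_i, cov_i = info[i]
--             cand = cov_i | mut_of(w)
--             if w not in info or len(cand) > len(info[w][1]):
--                 info[w] = (path_i + [w], cand)
--         visited |= frontier
--         frontier = {w for _, w in events} - visited
--         remaining -= 1
--     return {x: pc[0] for x, pc in info.items()}
-- ===== Notes on version B (the rewrite author's own statement) =====
-- stated objective: alternative
-- what changed: B flattens each BFS level into an explicit (parent,child) event list folded over a single per-node record (path, coverage-set) maintained incrementally, instead of A's nested loops over two parallel dicts with the coverage union recomputed over the whole path for every edge; B also stops once the frontier is empty instead of sweeping k levels unconditionally.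
import Mathlib
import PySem

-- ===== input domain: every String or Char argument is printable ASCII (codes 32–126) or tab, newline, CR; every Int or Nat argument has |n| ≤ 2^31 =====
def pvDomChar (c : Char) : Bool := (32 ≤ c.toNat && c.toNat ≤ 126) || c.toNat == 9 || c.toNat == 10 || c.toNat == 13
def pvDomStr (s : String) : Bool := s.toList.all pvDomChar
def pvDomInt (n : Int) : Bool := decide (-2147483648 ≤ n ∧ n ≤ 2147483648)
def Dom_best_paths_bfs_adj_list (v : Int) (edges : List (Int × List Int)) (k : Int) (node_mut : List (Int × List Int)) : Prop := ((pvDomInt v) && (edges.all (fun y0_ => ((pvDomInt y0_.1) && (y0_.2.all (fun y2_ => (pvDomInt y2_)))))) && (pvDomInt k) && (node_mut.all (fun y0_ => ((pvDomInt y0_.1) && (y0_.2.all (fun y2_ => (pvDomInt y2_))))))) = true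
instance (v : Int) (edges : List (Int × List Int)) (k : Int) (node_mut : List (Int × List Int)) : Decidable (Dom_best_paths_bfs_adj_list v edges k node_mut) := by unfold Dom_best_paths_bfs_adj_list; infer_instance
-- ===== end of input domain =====

-- B flattens each BFS level into an explicit (parent, child) event list folded over one
-- per-node record (path, coverage-set) maintained incrementally, instead of A's nested
-- loops over two parallel dicts with the coverage recomputed over the whole path per edge;
-- return value only (no argument is mutated).

-- ===== PORT A =====

-- coverage(a_set, node_mut): union of node_mut[x] over x in a_set (a_set given as its element list)
def pvCoverageA (a_set : List Int) (node_mut : PySem.Dict Int (List Int)) : PySem.Set Int :=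
  if a_set.isEmpty then PySem.Set.empty
  else a_set.foldl
    (fun cov x => if node_mut.contains x then PySem.Set.update cov (node_mut.getD x []) else cov)
    PySem.Set.empty

-- body of A's 'for w in edges[i]' loop; state = (gray, paths, paths_coverage).
-- paths[i] / paths_coverage[w] are read with getD: in A the key is always present there
-- (i comes from old_gray ⊆ paths.keys, and paths_coverage has the same keys as paths).
def pvAInner (node_mut : PySem.Dict Int (List Int)) (i : Int)
    (st : PySem.Set Int × PySem.Dict Int (List Int) × PySem.Dict Int Int) (w : Int) :
    PySem.Set Int × PySem.Dict Int (List Int) × PySem.Dict Int Int :=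
  let gray := PySem.Set.add st.1 w
  let paths := st.2.1
  let pcov := st.2.2
  let new_path := paths.getD i [] ++ [w]
  if paths.contains w = false then
    (gray, paths.insert w new_path,
     pcov.insert w (PySem.Set.len (pvCoverageA (PySem.Set.ofList new_path) node_mut)))
  else
    if PySem.Set.len (pvCoverageA (PySem.Set.ofList new_path) node_mut) > pcov.getD w 0 then
      (gray, paths.insert w new_path,
       pcov.insert w (PySem.Set.len (pvCoverageA new_path node_mut)))
    else (gray, paths, pcov)

-- body of A's 'for i in old_gray' loop
def pvALevel (edges node_mut : PySem.Dict Int (List Int))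
    (st : PySem.Set Int × PySem.Dict Int (List Int) × PySem.Dict Int Int) (i : Int) :
    PySem.Set Int × PySem.Dict Int (List Int) × PySem.Dict Int Int :=
  if edges.contains i then (edges.getD i []).foldl (pvAInner node_mut i) st else st

-- A's 'while degree < k' loop, fuel = remaining iterations
def pvALoop (edges node_mut : PySem.Dict Int (List Int)) :
    Nat → PySem.Set Int → PySem.Set Int → PySem.Dict Int (List Int) → PySem.Dict Int Int →
    PySem.Dict Int (List Int)
  | 0, _, _, paths, _ => paths
  | fuel + 1, black, old_gray, paths, pcov =>
    let st := old_gray.foldl (pvALevel edges node_mut) (PySem.Set.empty, paths, pcov)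
    let black' := PySem.Set.union black old_gray
    let gray' := PySem.Set.diff st.1 black'
    pvALoop edges node_mut fuel black' gray' st.2.1 st.2.2

def best_paths_bfs_adj_list (v : Int) (edges : List (Int × List Int)) (k : Int) (node_mut : List (Int × List Int)) : List (Int × List Int) :=
  let E := PySem.Dict.ofList edges
  let nm := PySem.Dict.ofList node_mut
  let paths := (PySem.Dict.empty : PySem.Dict Int (List Int)).insert v [v]
  let pcov := (PySem.Dict.empty : PySem.Dict Int Int).insert v
      (PySem.Set.len (pvCoverageA (PySem.Set.ofList [v]) nm))
  (pvALoop E nm k.toNat PySem.Set.empty (PySem.Set.add PySem.Set.empty v) paths pcov).items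

-- ===== PORT B =====

-- mut_of(x) of Source B
def pvMutOf (node_mut : PySem.Dict Int (List Int)) (x : Int) : PySem.Set Int :=
  if node_mut.contains x then PySem.Set.ofList (node_mut.getD x []) else PySem.Set.empty

-- Source B's event list: [(i, w) for i in frontier for w in edges.get(i, [])]
def pvEvents (edges : PySem.Dict Int (List Int)) (frontier : List Int) : List (Int × Int) :=
  frontier.flatMap (fun i => (edges.getD i []).map (fun w => (i, w)))

-- Source B's body of 'for i, w in events': one relaxation step on the single info record
def pvRelax (node_mut : PySem.Dict Int (List Int))
    (info : PySem.Dict Int (List Int × PySem.Set Int)) (ev : Int × Int) :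
    PySem.Dict Int (List Int × PySem.Set Int) :=
  let pi := info.getD ev.1 ([], [])
  let cand := PySem.Set.union pi.2 (pvMutOf node_mut ev.2)
  if info.contains ev.2 = false
      ∨ PySem.Set.len cand > PySem.Set.len ((info.getD ev.2 ([], [])).2) then
    info.insert ev.2 (pi.1 ++ [ev.2], cand)
  else info

-- Source B's 'while remaining > 0 and frontier' loop
def pvGo (edges node_mut : PySem.Dict Int (List Int)) :
    Nat → PySem.Set Int → PySem.Set Int → PySem.Dict Int (List Int × PySem.Set Int) →
    PySem.Dict Int (List Int × PySem.Set Int)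
  | 0, _, _, info => info
  | remaining + 1, visited, frontier, info =>
    if frontier.isEmpty then info
    else
      let evs := pvEvents edges frontier
      let info' := evs.foldl (pvRelax node_mut) info
      let visited' := PySem.Set.union visited frontier
      pvGo edges node_mut remaining visited'
        (PySem.Set.diff (PySem.Set.ofList (evs.map (·.2))) visited') info'

def best_paths_bfs_adj_list_alt (v : Int) (edges : List (Int × List Int)) (k : Int) (node_mut : List (Int × List Int)) : List (Int × List Int) :=
  let nm := PySem.Dict.ofList node_mut
  let final := pvGo (PySem.Dict.ofList edges) nm k.toNat PySem.Set.empty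
    (PySem.Set.ofList [v])
    ((PySem.Dict.empty : PySem.Dict Int (List Int × PySem.Set Int)).insert v ([v], pvMutOf nm v))
  final.items.map (fun p => (p.1, p.2.1))

-- ===== PRECONDITION & SPEC =====
def Spec_best_paths_bfs_adj_list (v : Int) (edges : List (Int × List Int)) (k : Int) (node_mut : List (Int × List Int)) (out : List (Int × List Int)) : Prop := out = best_paths_bfs_adj_list_alt v edges k node_mut
instance (v : Int) (edges : List (Int × List Int)) (k : Int) (node_mut : List (Int × List Int)) (out : List (Int × List Int)) : Decidable (Spec_best_paths_bfs_adj_list v edges k node_mut out) := by unfold Spec_best_paths_bfs_adj_list; infer_instance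

-- ===== CLAIM (what is proved, stated in full; the proofs are below) =====
def Claim_equal_best_paths_bfs_adj_list : Prop := ∀ (v : Int) (edges : List (Int × List Int)) (k : Int) (node_mut : List (Int × List Int)), Dom_best_paths_bfs_adj_list v edges k node_mut → Spec_best_paths_bfs_adj_list v edges k node_mut (best_paths_bfs_adj_list v edges k node_mut)

-- ===== LEMMAS AND PROOFS =====

-- the coverage of a path, as B maintains it (pvCoverageA over the path's element set)
def pvF (nm : PySem.Dict Int (List Int)) (p : List Int) : PySem.Set Int :=
  pvCoverageA (PySem.Set.ofList p) nm

-- the simulation invariant: A's paths/paths_coverage are the two projections of B's info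
def pvInv (nm : PySem.Dict Int (List Int)) (paths : PySem.Dict Int (List Int))
    (pcov : PySem.Dict Int Int) (info : PySem.Dict Int (List Int × PySem.Set Int)) : Prop :=
  paths.items = info.items.map (fun p => (p.1, p.2.1))
  ∧ (∀ x : Int, paths.get? x = (info.get? x).map (·.1))
  ∧ (∀ x : Int, (info.getD x ([], [])).2 = pvF nm ((info.getD x ([], [])).1)
      ∧ pcov.getD x 0 = PySem.Set.len ((info.getD x ([], [])).2))

theorem pvCoverageA_eq_fold (l : List Int) (nm : PySem.Dict Int (List Int)) :
    pvCoverageA l nm = l.foldl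
      (fun cov x => if nm.contains x then PySem.Set.update cov (nm.getD x []) else cov)
      PySem.Set.empty := by
  cases l <;> simp [pvCoverageA]

theorem pvUpdate_ofList {s : PySem.Set Int} {t : List Int} :
    PySem.Set.update s (PySem.Set.ofList t) = PySem.Set.update s t := by
  rw [PySem.Set.update_eq_append_filter, PySem.Set.update_eq_append_filter,
    PySem.Set.ofList_ofList]

theorem pvStep_eq_union (cov : PySem.Set Int) (x : Int) (nm : PySem.Dict Int (List Int)) :
    (if nm.contains x then PySem.Set.update cov (nm.getD x []) else cov)
      = PySem.Set.union cov (pvMutOf nm x) := by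
  unfold pvMutOf
  by_cases h : nm.contains x
  · simp only [h, if_true, PySem.Set.union]
    exact pvUpdate_ofList.symm
  · simp only [h, if_false, Bool.false_eq_true, PySem.Set.union, PySem.Set.update,
      PySem.Set.empty, List.foldl_nil]

theorem pvCoverageA_append_singleton (l : List Int) (w : Int) (nm : PySem.Dict Int (List Int)) :
    pvCoverageA (l ++ [w]) nm = PySem.Set.union (pvCoverageA l nm) (pvMutOf nm w) := by
  rw [pvCoverageA_eq_fold, pvCoverageA_eq_fold, List.foldl_append, List.foldl_cons,
    List.foldl_nil, pvStep_eq_union]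

theorem pvMem_mutOf {e x : Int} {nm : PySem.Dict Int (List Int)} :
    e ∈ pvMutOf nm x ↔ nm.contains x = true ∧ e ∈ nm.getD x [] := by
  unfold pvMutOf
  by_cases h : nm.contains x <;> simp [h, PySem.Set.mem_ofList, PySem.Set.empty]

theorem pvMem_coverageA {e : Int} {l : List Int} {nm : PySem.Dict Int (List Int)} :
    e ∈ pvCoverageA l nm ↔ ∃ x ∈ l, nm.contains x = true ∧ e ∈ nm.getD x [] := by
  induction l using List.reverseRecOn with
  | nil => simp [pvCoverageA, PySem.Set.empty]
  | append_singleton l w ih =>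
    rw [pvCoverageA_append_singleton]
    simp only [PySem.Set.mem_union, ih, pvMem_mutOf, List.mem_append, List.mem_singleton]
    constructor
    · rintro (⟨x, hx, h⟩ | h)
      · exact ⟨x, Or.inl hx, h⟩
      · exact ⟨w, Or.inr rfl, h⟩
    · rintro ⟨x, hx | rfl, h⟩
      · exact Or.inl ⟨x, hx, h⟩
      · exact Or.inr h

theorem pvUnion_of_subset {s t : PySem.Set Int} (h : ∀ e ∈ t, e ∈ s) :
    PySem.Set.union s t = s := by
  rw [PySem.Set.union, PySem.Set.update_eq_append_filter]
  have : (List.filter (fun y => !PySem.Set.contains s y) (PySem.Set.ofList t)) = [] := by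
    rw [List.filter_eq_nil_iff]
    intro y hy
    have hyt : y ∈ t := (PySem.Set.mem_ofList t y).mp hy
    simp only [PySem.Set.contains_eq_listContains, Bool.not_eq_true', List.contains_eq_mem,
      decide_eq_false_iff_not]
    exact fun hn => hn (h y hyt)
  rw [this, List.append_nil]

theorem pvF_append_singleton (nm : PySem.Dict Int (List Int)) (p : List Int) (w : Int) :
    pvF nm (p ++ [w]) = PySem.Set.union (pvF nm p) (pvMutOf nm w) := by
  unfold pvF
  rw [PySem.Set.ofList_append_singleton]
  by_cases hw : w ∈ PySem.Set.ofList p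
  · rw [PySem.Set.add_of_mem hw]
    refine (pvUnion_of_subset ?_).symm
    intro e he
    obtain ⟨h1, h2⟩ := pvMem_mutOf.mp he
    exact pvMem_coverageA.mpr ⟨w, hw, h1, h2⟩
  · rw [PySem.Set.add_of_not_mem hw, pvCoverageA_append_singleton]

theorem pvCoverageA_ofList (l : List Int) (nm : PySem.Dict Int (List Int)) :
    pvCoverageA (PySem.Set.ofList l) nm = pvCoverageA l nm := by
  induction l using List.reverseRecOn with
  | nil => rfl
  | append_singleton l w ih =>
    have h1 : pvCoverageA (PySem.Set.ofList (l ++ [w])) nm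
        = PySem.Set.union (pvCoverageA (PySem.Set.ofList l) nm) (pvMutOf nm w) :=
      pvF_append_singleton nm l w
    rw [h1, ih, pvCoverageA_append_singleton]

-- derived facts of the invariant
theorem pvInv_contains {nm paths pcov info} (h : pvInv nm paths pcov info) (x : Int) :
    paths.contains x = info.contains x := by
  rw [PySem.Dict.contains_eq_isSome_get?, PySem.Dict.contains_eq_isSome_get?, h.2.1 x,
    Option.isSome_map]

theorem pvInv_getD {nm paths pcov info} (h : pvInv nm paths pcov info) (x : Int) :
    paths.getD x [] = (info.getD x (([] : List Int), ([] : PySem.Set Int))).1 := by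
  rw [PySem.Dict.getD_eq_get?_getD, PySem.Dict.getD_eq_get?_getD, h.2.1 x]
  cases info.get? x <;> rfl

-- inserting the same relaxation on both sides preserves the invariant
theorem pvInv_insert {nm paths pcov info} (h : pvInv nm paths pcov info)
    (w : Int) (np : List Int) (cand : PySem.Set Int) (hc : cand = pvF nm np) :
    pvInv nm (paths.insert w np) (pcov.insert w (PySem.Set.len cand))
      (info.insert w (np, cand)) := by
  refine ⟨?_, ?_, ?_⟩
  · by_cases hw : info.contains w = true
    · rw [PySem.Dict.items_insert_of_contains _ _ ((pvInv_contains h w).trans hw),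
        PySem.Dict.items_insert_of_contains _ _ hw, h.1, List.map_map, List.map_map]
      refine List.map_congr_left ?_
      intro p _
      by_cases hp : p.1 = w <;> simp [hp]
    · have hw' : info.contains w = false := by
        cases hcase : info.contains w
        · rfl
        · exact absurd hcase hw
      rw [PySem.Dict.items_insert_of_not_contains _ _ ((pvInv_contains h w).trans hw'),
        PySem.Dict.items_insert_of_not_contains _ _ hw', h.1, List.map_append]
      rfl
  · intro x
    rw [PySem.Dict.get?_insert, PySem.Dict.get?_insert]
    by_cases hx : x = w
    · simp [hx]
    · simp only [hx, if_false]
      exact h.2.1 x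
  · intro x
    rw [PySem.Dict.getD_insert, PySem.Dict.getD_insert]
    by_cases hx : x = w
    · subst hx
      rw [if_pos rfl, if_pos rfl]
      exact ⟨hc, rfl⟩
    · simp only [hx, if_false]
      exact h.2.2 x

-- one relaxation event, lockstep: A's inner body vs B's pvRelax
theorem pvStep_lockstep (nm : PySem.Dict Int (List Int)) (i w : Int)
    (g : PySem.Set Int) (paths : PySem.Dict Int (List Int)) (pcov : PySem.Dict Int Int)
    (info : PySem.Dict Int (List Int × PySem.Set Int)) (h : pvInv nm paths pcov info) :
    (pvAInner nm i (g, paths, pcov) w).1 = PySem.Set.add g w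
    ∧ pvInv nm (pvAInner nm i (g, paths, pcov) w).2.1 (pvAInner nm i (g, paths, pcov) w).2.2
        ((pvRelax nm info (i, w))) := by
  have hgi := pvInv_getD h i
  have hcw := pvInv_contains h w
  obtain ⟨hcovi, -⟩ := h.2.2 i
  obtain ⟨hcovw, hpcw⟩ := h.2.2 w
  have hcand : PySem.Set.union (info.getD i ([], [])).2 (pvMutOf nm w)
      = pvF nm (paths.getD i [] ++ [w]) := by
    rw [hcovi, hgi, pvF_append_singleton]
  have hlen1 : PySem.Set.len (pvCoverageA (PySem.Set.ofList (paths.getD i [] ++ [w])) nm)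
      = PySem.Set.len (PySem.Set.union (info.getD i ([], [])).2 (pvMutOf nm w)) := by
    rw [hcand]; rfl
  have hnp : paths.getD i [] ++ [w] = (info.getD i ([], [])).1 ++ [w] := by rw [hgi]
  unfold pvAInner pvRelax
  dsimp only
  by_cases hw : paths.contains w = false
  · rw [if_pos hw, if_pos (Or.inl (hcw ▸ hw))]
    refine ⟨rfl, ?_⟩
    rw [hlen1, ← hnp]
    exact pvInv_insert h w _ _ hcand
  · have hcond : (PySem.Set.len (pvCoverageA (PySem.Set.ofList (paths.getD i [] ++ [w])) nm)
        > pcov.getD w 0)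
        ↔ (PySem.Set.len (PySem.Set.union (info.getD i ([], [])).2 (pvMutOf nm w))
          > PySem.Set.len ((info.getD w ([], [])).2)) := by
      rw [hlen1, hpcw]
    rw [if_neg hw]
    by_cases hgt : PySem.Set.len (pvCoverageA (PySem.Set.ofList (paths.getD i [] ++ [w])) nm)
        > pcov.getD w 0
    · rw [if_pos hgt, if_pos (Or.inr (hcond.mp hgt))]
      refine ⟨rfl, ?_⟩
      have hlen2 : PySem.Set.len (pvCoverageA (paths.getD i [] ++ [w]) nm)
          = PySem.Set.len (PySem.Set.union (info.getD i ([], [])).2 (pvMutOf nm w)) := by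
        rw [hcand]
        unfold pvF
        rw [pvCoverageA_ofList]
      rw [hlen2, ← hnp]
      exact pvInv_insert h w _ _ hcand
    · have hnot : ¬ (info.contains w = false
          ∨ PySem.Set.len (PySem.Set.union (info.getD i ([], [])).2 (pvMutOf nm w))
            > PySem.Set.len ((info.getD w ([], [])).2)) := by
        rintro (hleft | hright)
        · exact hw (hcw.trans hleft)
        · exact hgt (hcond.mpr hright)
      rw [if_neg hgt, if_neg hnot]
      exact ⟨rfl, h⟩

-- folding a whole event list, lockstep; A's gray component collects the targets
theorem pvFold_lockstep (nm : PySem.Dict Int (List Int)) (evs : List (Int × Int))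
    (g : PySem.Set Int) (paths : PySem.Dict Int (List Int)) (pcov : PySem.Dict Int Int)
    (info : PySem.Dict Int (List Int × PySem.Set Int)) (h : pvInv nm paths pcov info) :
    (evs.foldl (fun st ev => pvAInner nm ev.1 st ev.2) (g, paths, pcov)).1
        = PySem.Set.update g (evs.map (·.2))
    ∧ pvInv nm (evs.foldl (fun st ev => pvAInner nm ev.1 st ev.2) (g, paths, pcov)).2.1
        (evs.foldl (fun st ev => pvAInner nm ev.1 st ev.2) (g, paths, pcov)).2.2
        (evs.foldl (pvRelax nm) info) := by
  induction evs generalizing g paths pcov info with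
  | nil => exact ⟨rfl, h⟩
  | cons ev evs ih =>
    obtain ⟨h1, h2⟩ := pvStep_lockstep nm ev.1 ev.2 g paths pcov info h
    have hst : pvAInner nm ev.1 (g, paths, pcov) ev.2
        = (PySem.Set.add g ev.2, (pvAInner nm ev.1 (g, paths, pcov) ev.2).2.1,
           (pvAInner nm ev.1 (g, paths, pcov) ev.2).2.2) := by
      rw [← h1]
    simp only [List.foldl_cons, List.map_cons, PySem.Set.update_cons]
    rw [hst]
    exact ih _ _ _ _ h2

-- A's per-level nested loop is the fold over B's event list
theorem pvALevel_eq_events (E nm : PySem.Dict Int (List Int)) (fr : List Int)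
    (st : PySem.Set Int × PySem.Dict Int (List Int) × PySem.Dict Int Int) :
    fr.foldl (pvALevel E nm) st
      = (pvEvents E fr).foldl (fun st ev => pvAInner nm ev.1 st ev.2) st := by
  rw [pvEvents, List.foldl_flatMap]
  induction fr generalizing st with
  | nil => rfl
  | cons i fr ih =>
    simp only [List.foldl_cons]
    rw [ih]
    congr 1
    rw [List.foldl_map]
    unfold pvALevel
    by_cases hc : E.contains i
    · rw [if_pos hc]
    · rw [if_neg hc]
      have : E.getD i [] = [] := PySem.Dict.getD_of_not_contains _ _ (by
        cases h2 : E.contains i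
        · rfl
        · exact absurd h2 hc)
      rw [this, List.foldl_nil]

theorem pvALoop_empty (E nm : PySem.Dict Int (List Int)) (fuel : Nat)
    (black : PySem.Set Int) (paths : PySem.Dict Int (List Int)) (pcov : PySem.Dict Int Int) :
    pvALoop E nm fuel black [] paths pcov = paths := by
  induction fuel generalizing black with
  | zero => rfl
  | succ fuel ih =>
    show pvALoop E nm fuel _ _ _ _ = paths
    simp only [List.foldl_nil]
    have hdiff : PySem.Set.diff (PySem.Set.empty : PySem.Set Int)
        (PySem.Set.union black []) = [] := rfl
    rw [hdiff]
    exact ih _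

-- the whole loops, lockstep
theorem pvLoop_lockstep (E nm : PySem.Dict Int (List Int)) (fuel : Nat)
    (black frontier : PySem.Set Int) (paths : PySem.Dict Int (List Int))
    (pcov : PySem.Dict Int Int) (info : PySem.Dict Int (List Int × PySem.Set Int))
    (h : pvInv nm paths pcov info) :
    (pvALoop E nm fuel black frontier paths pcov).items
      = (pvGo E nm fuel black frontier info).items.map (fun p => (p.1, p.2.1)) := by
  induction fuel generalizing black frontier paths pcov info with
  | zero => exact h.1
  | succ fuel ih =>
    by_cases he : frontier.isEmpty
    · have hf : frontier = [] := List.isEmpty_iff.mp he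
      subst hf
      rw [pvALoop_empty]
      simp only [pvGo, List.isEmpty_nil, if_true]
      exact h.1
    · obtain ⟨hg, hinv⟩ := pvFold_lockstep nm (pvEvents E frontier) PySem.Set.empty
        paths pcov info h
      simp only [pvALoop, pvGo, if_neg he]
      have hnil : PySem.Set.update (PySem.Set.empty : PySem.Set Int)
          ((pvEvents E frontier).map (·.2)) = PySem.Set.ofList ((pvEvents E frontier).map (·.2)) :=
        PySem.Set.update_nil_left _
      rw [pvALevel_eq_events, hg, hnil]
      exact ih _ _ _ _ _ hinv

theorem pvF_single (nm : PySem.Dict Int (List Int)) (x : Int) :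
    pvF nm [x] = pvMutOf nm x := by
  unfold pvF
  have h1 : (PySem.Set.ofList [x] : PySem.Set Int) = [x] := rfl
  rw [h1, pvCoverageA_eq_fold, List.foldl_cons, List.foldl_nil]
  unfold pvMutOf
  by_cases h : nm.contains x
  · rw [if_pos h, if_pos h]
    exact PySem.Set.update_nil_left _
  · rw [if_neg h, if_neg h]

-- the initial states satisfy the invariant
theorem pvInv_init (v : Int) (nm : PySem.Dict Int (List Int)) :
    pvInv nm ((PySem.Dict.empty : PySem.Dict Int (List Int)).insert v [v])
      ((PySem.Dict.empty : PySem.Dict Int Int).insert v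
        (PySem.Set.len (pvCoverageA (PySem.Set.ofList [v]) nm)))
      ((PySem.Dict.empty : PySem.Dict Int (List Int × PySem.Set Int)).insert v
        ([v], pvMutOf nm v)) := by
  refine ⟨?_, ?_, ?_⟩
  · rw [PySem.Dict.items_insert_of_not_contains _ _ (PySem.Dict.contains_empty v),
      PySem.Dict.items_insert_of_not_contains _ _ (PySem.Dict.contains_empty v)]
    rfl
  · intro x
    rw [PySem.Dict.get?_insert, PySem.Dict.get?_insert]
    by_cases hx : x = v <;> simp [hx, PySem.Dict.get?_empty]
  · intro x
    rw [PySem.Dict.getD_insert, PySem.Dict.getD_insert]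
    by_cases hx : x = v
    · subst hx
      rw [if_pos rfl, if_pos rfl]
      exact ⟨(pvF_single nm _).symm, rfl⟩
    · simp only [hx, if_false]
      rw [PySem.Dict.getD_empty, PySem.Dict.getD_empty]
      exact ⟨rfl, rfl⟩

theorem pv_main (v : Int) (edges : List (Int × List Int)) (k : Int)
    (node_mut : List (Int × List Int)) :
    best_paths_bfs_adj_list v edges k node_mut = best_paths_bfs_adj_list_alt v edges k node_mut := by
  unfold best_paths_bfs_adj_list best_paths_bfs_adj_list_alt
  dsimp only
  have hfr : (PySem.Set.add (PySem.Set.empty : PySem.Set Int) v) = PySem.Set.ofList [v] := rfl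
  rw [hfr]
  exact pvLoop_lockstep (PySem.Dict.ofList edges) (PySem.Dict.ofList node_mut) k.toNat
    PySem.Set.empty (PySem.Set.ofList [v]) _ _ _
    (pvInv_init v (PySem.Dict.ofList node_mut))

-- ===== VERDICT (by name: the statement is the Claim_ definition above) =====
theorem best_paths_bfs_adj_list_spec : Claim_equal_best_paths_bfs_adj_list := by
  intro v edges k node_mut _
  exact pv_main v edges k node_mut
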